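-- pv_equiv track=rewrite | github.com/Aragornll-Zhang/SocialEmotion_Sina_Weibo_Vote | model/GCN/Graph_init.py | count_Co_Occurence
-- ===== SOURCE A (Python) =====
-- def count_Co_Occurence(raw_labels , dim = 24 ):
--     '''
--     :param raw_labels: 多标签分类的 ground truth, e.g.
--            [[label a, label b] , [label a] , [label b , label c , label a] , ...]
--     :param dim: 标签总数
--     :return:
--     '''
--     Mat = [[0] * dim for _ in range(dim)]  # symmetric
--     for labels in raw_labels:
--         for i in range(len(labels)):
--             for j in range(i, len(labels)):
--                 x = labels[i]
--                 y = labels[j]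
--                 Mat[x][y] += 1
--                 if x != y:
--                     Mat[y][x] += 1 # 之前的不对称...
--     return Mat
-- ===== SOURCE B (Python) =====
-- def count_Co_Occurence(raw_labels, dim=24):
--     # Count each label list once, then combine counts: c*(c+1)//2 on the
--     # diagonal, ca*cb off-diagonal -- one pass per list instead of a
--     # quadratic loop over index pairs.
--     Mat = [[0] * dim for _ in range(dim)]
--     for labels in raw_labels:
--         cnt = {}
--         for l in labels:
--             cnt[l] = cnt.get(l, 0) + 1
--         items = list(cnt.items())
--         for a, ca in items:
--             Mat[a][a] += ca * (ca + 1) // 2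
--             for b, cb in items:
--                 if a != b:
--                     Mat[a][b] += ca * cb
--     return Mat
-- ===== Notes on version B (the rewrite author's own statement) =====
-- stated objective: faster
-- what changed: Per label list, B counts label multiplicities once into a dict and then adds c*(c+1)//2 to each diagonal cell and ca*cb to each off-diagonal pair of distinct labels, instead of A's quadratic enumeration of all index pairs of the list.
import Mathlib
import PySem

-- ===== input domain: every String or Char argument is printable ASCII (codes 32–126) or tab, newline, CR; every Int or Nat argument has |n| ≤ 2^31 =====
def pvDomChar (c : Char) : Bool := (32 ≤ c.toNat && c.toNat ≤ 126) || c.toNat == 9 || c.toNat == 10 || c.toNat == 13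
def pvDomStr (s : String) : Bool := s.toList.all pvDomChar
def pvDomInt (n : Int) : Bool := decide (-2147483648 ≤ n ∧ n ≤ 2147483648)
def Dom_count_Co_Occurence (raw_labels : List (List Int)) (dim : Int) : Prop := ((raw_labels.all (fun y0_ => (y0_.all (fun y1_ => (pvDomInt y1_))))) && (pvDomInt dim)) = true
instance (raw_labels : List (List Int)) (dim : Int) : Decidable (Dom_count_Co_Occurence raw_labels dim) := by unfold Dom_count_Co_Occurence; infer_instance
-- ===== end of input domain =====

-- B replaces A's quadratic loop over index pairs of each label list by a count-then-combine
-- pass (per-list counter; c*(c+1)//2 on the diagonal, ca*cb off-diagonal); same return value.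

-- Shared primitive: Python's `Mat[x][y] += v` on a list-of-lists matrix
-- (negative index counts from the end, exactly as in Python; out-of-range
-- writes — where Python raises IndexError — are excluded by Pre_ below).
def madd (mat : List (List Int)) (x y v : Int) : List (List Int) :=
  let i : Int := if x < 0 then x + (mat.length : Int) else x
  if 0 ≤ i ∧ i < (mat.length : Int) then
    mat.modify i.toNat (fun row =>
      let j : Int := if y < 0 then y + (row.length : Int) else y
      if 0 ≤ j ∧ j < (row.length : Int) then row.modify j.toNat (· + v) else row)
  else mat

-- ===== PORT A =====
def count_Co_Occurence (raw_labels : List (List Int)) (dim : Int) : List (List Int) :=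
  let Mat := List.replicate dim.toNat (List.replicate dim.toNat (0 : Int))
  raw_labels.foldl (fun Mat labels =>
    (PySem.List.pyRange 0 (labels.length : Int)).foldl (fun Mat i =>
      (PySem.List.pyRange i (labels.length : Int)).foldl (fun Mat j =>
        let x := PySem.List.pyGetD labels i 0   -- labels[i], i always in range here
        let y := PySem.List.pyGetD labels j 0   -- labels[j], j always in range here
        let Mat2 := madd Mat x y 1
        if x ≠ y then madd Mat2 y x 1 else Mat2) Mat) Mat) Mat

-- ===== PORT B =====
def count_Co_Occurence_alt (raw_labels : List (List Int)) (dim : Int) : List (List Int) :=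
  let Mat := List.replicate dim.toNat (List.replicate dim.toNat (0 : Int))
  raw_labels.foldl (fun Mat labels =>
    let cnt : PySem.Dict Int Int :=
      labels.foldl (fun d l => d.insert l (d.getD l 0 + 1)) PySem.Dict.empty
    let items := cnt.items
    items.foldl (fun Mat p =>
      let Mat2 := madd Mat p.1 p.1 (PySem.Int.floordiv (p.2 * (p.2 + 1)) 2)
      items.foldl (fun Mat q =>
        if p.1 ≠ q.1 then madd Mat p.1 q.1 (p.2 * q.2) else Mat) Mat2) Mat) Mat

-- ===== PRECONDITION & SPEC =====
-- Pre_ is exactly the natural domain on which the Python A returns normally: every label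
-- must be a valid matrix index, i.e. -dim ≤ x < dim (otherwise A raises IndexError).
def Pre_count_Co_Occurence (raw_labels : List (List Int)) (dim : Int) : Prop :=
  ∀ ls ∈ raw_labels, ∀ x ∈ ls, -dim ≤ x ∧ x < dim
instance (raw_labels : List (List Int)) (dim : Int) : Decidable (Pre_count_Co_Occurence raw_labels dim) := by
  unfold Pre_count_Co_Occurence; infer_instance

def pvWitness_count_Co_Occurence : List (List Int) × Int := ([[0, 1], [1], [1, 1, 0]], 2)

def Spec_count_Co_Occurence (raw_labels : List (List Int)) (dim : Int) (out : List (List Int)) : Prop := out = count_Co_Occurence_alt raw_labels dim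
instance (raw_labels : List (List Int)) (dim : Int) (out : List (List Int)) : Decidable (Spec_count_Co_Occurence raw_labels dim out) := by unfold Spec_count_Co_Occurence; infer_instance

-- ===== CLAIM (what is proved, stated in full; the proofs are below) =====
def Claim_equal_count_Co_Occurence : Prop := ∀ (raw_labels : List (List Int)) (dim : Int), Dom_count_Co_Occurence raw_labels dim → Pre_count_Co_Occurence raw_labels dim → Spec_count_Co_Occurence raw_labels dim (count_Co_Occurence raw_labels dim)

-- ===== LEMMAS AND PROOFS =====

-- ---- proof-side vocabulary ----

-- normalized matrix index of a Python index x (valid range -dim ≤ x < dim)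
def nidx (dim x : Int) : Nat := (if x < 0 then x + dim else x).toNat
-- 0/1 indicator: label x lands in row/column i
def chi (dim x : Int) (i : Nat) : Int := if nidx dim x = i then 1 else 0
def InR (dim x : Int) : Prop := -dim ≤ x ∧ x < dim
-- matrix entry (0 outside)
def ent (mat : List (List Int)) (i j : Nat) : Int := (mat.getD i []).getD j 0
def Shape (mat : List (List Int)) (d : Nat) : Prop := mat.length = d ∧ ∀ r ∈ mat, r.length = d

def isum {α : Type} (l : List α) (f : α → Int) : Int := (l.map f).sum

-- weight that A's pair loop adds for the (ordered, i ≤ j) pair of labels (x, y),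
-- seen through the indicators f = chi · i, g = chi · j
def wgt (f g : Int → Int) (x y : Int) : Int := f x * g y + (if x = y then 0 else f y * g x)

-- structural form of A's inner double loop
def stepA (m : List (List Int)) (x y : Int) : List (List Int) :=
  let m2 := madd m x y 1
  if x ≠ y then madd m2 y x 1 else m2

def loopA : List Int → List (List Int) → List (List Int)
  | [], m => m
  | x :: t, m => loopA t ((x :: t).foldl (fun m2 y => stepA m2 x y) m)

-- total weight A's pair loop adds at cell (i, j), via f = chi · i, g = chi · j
def pw (f g : Int → Int) : List Int → Int
  | [] => 0
  | x :: t => isum (x :: t) (wgt f g x) + pw f g t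

-- B's per-list items and its total weight at a cell
def itemsOf (ls : List Int) : List (Int × Int) :=
  (PySem.Set.ofList ls).map (fun k => (k, (ls.count k : Int)))

def loopB (ls : List Int) (m : List (List Int)) : List (List Int) :=
  (itemsOf ls).foldl (fun M p =>
    (itemsOf ls).foldl (fun M q =>
      if p.1 ≠ q.1 then madd M p.1 q.1 (p.2 * q.2) else M)
      (madd M p.1 p.1 (PySem.Int.floordiv (p.2 * (p.2 + 1)) 2))) m

def sb (f g : Int → Int) (ls : List Int) : Int :=
  isum (itemsOf ls) (fun p =>
    f p.1 * g p.1 * PySem.Int.floordiv (p.2 * (p.2 + 1)) 2 +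
    isum (itemsOf ls) (fun q => if p.1 = q.1 then 0 else f p.1 * g q.1 * (p.2 * q.2)))

-- lower-triangle count c*(c-1)//2
def tl (c : Int) : Int := PySem.Int.floordiv (c * (c - 1)) 2

def corr (f g : Int → Int) : List Int → Int
  | [] => 0
  | x :: t => f x * g x * (t.count x : Int) + corr f g t

-- ---- small arithmetic facts ----

lemma t2_sub_sq (c : Int) : PySem.Int.floordiv (c * (c + 1)) 2 - c * c = -(tl c) := by
  obtain ⟨u, hu⟩ : (2 : Int) ∣ c * (c + 1) := (Int.even_mul_succ_self c).two_dvd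
  obtain ⟨w, hw⟩ : (2 : Int) ∣ c * (c - 1) := by
    have h := Int.even_mul_succ_self (c - 1)
    have heq : (c - 1) * (c - 1 + 1) = c * (c - 1) := by ring
    rw [heq] at h
    exact h.two_dvd
  rw [tl, PySem.Int.floordiv_eq_ediv_of_pos (by norm_num),
    PySem.Int.floordiv_eq_ediv_of_pos (by norm_num), hu, hw,
    Int.mul_ediv_cancel_left _ (by norm_num), Int.mul_ediv_cancel_left _ (by norm_num)]
  nlinarith [hu, hw]

lemma tl_succ (c : Int) : tl (c + 1) = tl c + c := by
  obtain ⟨u, hu⟩ : (2 : Int) ∣ (c + 1) * c := by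
    have h := Int.even_mul_succ_self c
    have heq : c * (c + 1) = (c + 1) * c := by ring
    rw [heq] at h
    exact h.two_dvd
  obtain ⟨w, hw⟩ : (2 : Int) ∣ c * (c - 1) := by
    have h := Int.even_mul_succ_self (c - 1)
    have heq : (c - 1) * (c - 1 + 1) = c * (c - 1) := by ring
    rw [heq] at h
    exact h.two_dvd
  rw [tl, tl]
  have h1 : (c + 1) * (c + 1 - 1) = (c + 1) * c := by ring
  rw [h1, PySem.Int.floordiv_eq_ediv_of_pos (by norm_num),
    PySem.Int.floordiv_eq_ediv_of_pos (by norm_num), hu, hw,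
    Int.mul_ediv_cancel_left _ (by norm_num), Int.mul_ediv_cancel_left _ (by norm_num)]
  nlinarith [hu, hw]

-- ---- matrix plumbing ----

lemma getD_modify' {α : Type} (l : List α) (k : Nat) (F : α → α) (i : Nat) (d0 : α) :
    (l.modify k F).getD i d0 = if k = i ∧ i < l.length then F (l.getD i d0) else l.getD i d0 := by
  rw [List.getD_eq_getElem?_getD, List.getD_eq_getElem?_getD, List.getElem?_modify]
  by_cases hi : i < l.length
  · rw [List.getElem?_eq_getElem hi]
    by_cases hk : k = i <;> simp [hk, hi]
  · rw [List.getElem?_eq_none (by omega)]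
    simp [hi]

lemma dim_pos_of_InR {dim x : Int} (h : InR dim x) : 0 < dim := by
  rcases h with ⟨h1, h2⟩; omega

lemma shape_madd {m : List (List Int)} {d : Nat} (h : Shape m d) (x y v : Int) :
    Shape (madd m x y v) d := by
  have shape_modify : ∀ (k : Nat) (F : List Int → List Int),
      (∀ r, (F r).length = r.length) → Shape (m.modify k F) d := by
    intro k F hF
    refine ⟨by simp [List.length_modify, h.1], ?_⟩
    intro r hr
    obtain ⟨n, hn, hget⟩ := List.getElem_of_mem hr
    rw [List.getElem_modify] at hget
    have hn' : n < m.length := by simpa using hn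
    split at hget
    · subst hget
      rw [hF]
      exact h.2 _ (List.getElem_mem hn')
    · subst hget
      exact h.2 _ (List.getElem_mem hn')
  unfold madd
  dsimp only
  split
  · split
    · apply shape_modify
      intro r
      dsimp only
      split <;> split <;> simp [List.length_modify]
    · exact h
  · split
    · apply shape_modify
      intro r
      dsimp only
      split <;> split <;> simp [List.length_modify]
    · exact h

lemma ent_madd {m : List (List Int)} {dim : Int} (h : Shape m dim.toNat)
    {x y : Int} (hx : InR dim x) (hy : InR dim y) (v : Int) (i j : Nat) :
    ent (madd m x y v) i j = ent m i j + chi dim x i * chi dim y j * v := by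
  have hdim : 0 < dim := dim_pos_of_InR hx
  have hlenI : (m.length : Int) = dim := by rw [h.1]; omega
  have hix : (0 : Int) ≤ (if x < 0 then x + dim else x) ∧ (if x < 0 then x + dim else x) < dim := by
    rcases hx with ⟨hx1, hx2⟩; split <;> omega
  have hiy : (0 : Int) ≤ (if y < 0 then y + dim else y) ∧ (if y < 0 then y + dim else y) < dim := by
    rcases hy with ⟨hy1, hy2⟩; split <;> omega
  have hnx : nidx dim x < dim.toNat := by
    unfold nidx; omega
  have hny : nidx dim y < dim.toNat := by
    unfold nidx; omega
  unfold madd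
  rw [hlenI, if_pos hix]
  unfold ent
  rw [getD_modify']
  by_cases hki : nidx dim x = i
  · have hkiT : (if x < 0 then x + dim else x).toNat = i := hki
    have hilen : i < m.length := by rw [h.1]; omega
    rw [if_pos ⟨hkiT, hilen⟩]
    have hrow : m.getD i [] ∈ m := by
      rw [List.getD_eq_getElem _ _ hilen]; exact List.getElem_mem hilen
    have hrlen : (m.getD i []).length = dim.toNat := h.2 _ hrow
    have hrlenI : ((m.getD i []).length : Int) = dim := by rw [hrlen]; omega
    simp only [hrlenI]
    rw [if_pos hiy, getD_modify']
    by_cases hkj : nidx dim y = j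
    · have hkjT : (if y < 0 then y + dim else y).toNat = j := hkj
      have hjlen : j < (m.getD i []).length := by rw [hrlen]; omega
      rw [if_pos ⟨hkjT, hjlen⟩]
      simp [chi, hki, hkj]
    · rw [if_neg (by intro hc; exact hkj hc.1)]
      simp [chi, hkj]
  · rw [if_neg (by intro hc; exact hki hc.1)]
    simp [chi, hki]

lemma mat_eq_of_ent {m1 m2 : List (List Int)} {d : Nat}
    (h1 : Shape m1 d) (h2 : Shape m2 d) (h : ∀ i j, ent m1 i j = ent m2 i j) : m1 = m2 := by
  apply List.ext_getElem (by rw [h1.1, h2.1])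
  intro n hn1 hn2
  apply List.ext_getElem
  · rw [h1.2 _ (List.getElem_mem hn1), h2.2 _ (List.getElem_mem hn2)]
  intro k hk1 hk2
  have := h n k
  unfold ent at this
  rwa [List.getD_eq_getElem _ _ hn1, List.getD_eq_getElem _ _ hn2,
    List.getD_eq_getElem _ _ hk1, List.getD_eq_getElem _ _ hk2] at this

-- ---- A side: structural loop, shape and entries ----

lemma stepA_char {m : List (List Int)} {dim : Int} (h : Shape m dim.toNat)
    {x y : Int} (hx : InR dim x) (hy : InR dim y) (i j : Nat) :
    Shape (stepA m x y) dim.toNat ∧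
    ent (stepA m x y) i j = ent m i j + wgt (chi dim · i) (chi dim · j) x y := by
  unfold stepA wgt
  by_cases hxy : x = y
  · subst hxy
    rw [if_neg (fun hc : x ≠ x => hc rfl), if_pos rfl]
    refine ⟨shape_madd h x x 1, ?_⟩
    rw [ent_madd h hx hx 1 i j]
    ring
  · rw [if_pos hxy, if_neg hxy]
    refine ⟨shape_madd (shape_madd h x y 1) y x 1, ?_⟩
    rw [ent_madd (shape_madd h x y 1) hy hx 1 i j, ent_madd h hx hy 1 i j]
    ring

lemma loopOne_char {dim : Int} (ys : List Int) (x : Int) :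
    ∀ m : List (List Int), Shape m dim.toNat → InR dim x → (∀ y ∈ ys, InR dim y) →
    ∀ i j : Nat,
    Shape (ys.foldl (fun m2 y => stepA m2 x y) m) dim.toNat ∧
    ent (ys.foldl (fun m2 y => stepA m2 x y) m) i j
      = ent m i j + isum ys (wgt (chi dim · i) (chi dim · j) x) := by
  induction ys with
  | nil => intro m hm hx hys i j; exact ⟨hm, by simp [isum]⟩
  | cons y t ih =>
    intro m hm hx hys i j
    have hy : InR dim y := hys y (by simp)
    have hstep := stepA_char hm hx hy i j
    have hrec := ih (stepA m x y) (stepA_char hm hx hy 0 0).1 hx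
      (fun z hz => hys z (by simp [hz]))
    refine ⟨(hrec i j).1, ?_⟩
    rw [List.foldl_cons, (hrec i j).2, hstep.2]
    simp [isum]
    ring

lemma loopA_char {dim : Int} (ls : List Int) :
    ∀ m : List (List Int), Shape m dim.toNat → (∀ x ∈ ls, InR dim x) →
    ∀ i j : Nat,
    Shape (loopA ls m) dim.toNat ∧
    ent (loopA ls m) i j = ent m i j + pw (chi dim · i) (chi dim · j) ls := by
  induction ls with
  | nil => intro m hm _ i j; exact ⟨hm, by simp [loopA, pw]⟩
  | cons x t ih =>
    intro m hm hls i j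
    have hx : InR dim x := hls x (by simp)
    have hone := loopOne_char (dim := dim) (x :: t) x m hm hx hls
    have hrec := ih _ (hone 0 0).1 (fun z hz => hls z (by simp [hz]))
    refine ⟨(hrec i j).1, ?_⟩
    show ent (loopA t _) i j = _
    rw [(hrec i j).2, (hone i j).2, pw]
    ring

lemma portA_inner_eq (ls : List Int) (m : List (List Int)) :
    (PySem.List.pyRange 0 (ls.length : Int)).foldl (fun M i =>
      (PySem.List.pyRange i (ls.length : Int)).foldl (fun M j =>
        stepA M (PySem.List.pyGetD ls i 0) (PySem.List.pyGetD ls j 0)) M) m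
    = loopA ls m := by
  have hdrop : ∀ (ls : List Int) (m : List (List Int)),
      (PySem.List.pyRange 0 (ls.length : Int)).foldl (fun M i =>
        (ls.drop i.toNat).foldl (fun M y => stepA M (PySem.List.pyGetD ls i 0) y) M) m
      = loopA ls m := by
    intro ls
    induction ls with
    | nil =>
      intro m
      rw [show ((List.length ([] : List Int) : Int)) = 0 by simp,
        PySem.List.pyRange_one_eq_nil le_rfl]
      rfl
    | cons x t ih =>
      intro m
      have hlen : (((x :: t).length : Int)) = (t.length : Int) + 1 := by
        push_cast [List.length_cons]; ring
      rw [hlen, PySem.List.pyRange_one_cons (by omega), List.foldl_cons]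
      have h0 : ((0 : Int).toNat) = 0 := rfl
      rw [show ((x :: t).drop (0 : Int).toNat) = x :: t from rfl,
        PySem.List.pyGetD_zero_cons]
      set m' := (x :: t).foldl (fun m2 y => stepA m2 x y) m with hm'
      calc (PySem.List.pyRange (0 + 1) ((t.length : Int) + 1)).foldl (fun M i =>
              ((x :: t).drop i.toNat).foldl (fun M y => stepA M (PySem.List.pyGetD (x :: t) i 0) y) M) m'
          = (PySem.List.pyRange 0 ((t.length : Int))).foldl (fun M i =>
              (t.drop i.toNat).foldl (fun M y => stepA M (PySem.List.pyGetD t i 0) y) M) m' := by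
            rw [PySem.List.pyRange_one, PySem.List.pyRange_one,
              show (((t.length : Int) + 1 - (0 + 1))).toNat = t.length by omega,
              show (((t.length : Int) - 0)).toNat = t.length by omega,
              List.foldl_map, List.foldl_map]
            apply PySem.List.foldl_congr_mem
            intro acc k _
            have hcast : ((0 : Int) + 1 + (k : Int)) = (((k + 1 : Nat) : Int)) := by push_cast; ring
            have hcast2 : ((0 : Int) + (k : Int)) = ((k : Nat) : Int) := by ring
            rw [hcast, hcast2, PySem.List.pyGetD_natCast, PySem.List.pyGetD_natCast,
              Int.toNat_natCast, Int.toNat_natCast, List.drop_succ_cons, List.getD_cons_succ]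
        _ = loopA t m' := ih m'
        _ = loopA (x :: t) m := rfl
  calc _ = (PySem.List.pyRange 0 (ls.length : Int)).foldl (fun M i =>
            (ls.drop i.toNat).foldl (fun M y => stepA M (PySem.List.pyGetD ls i 0) y) M) m := by
          apply PySem.List.foldl_congr_mem
          intro acc i hi
          exact PySem.List.foldl_pyRange_pyGetD' ls 0
            (fun M y => stepA M (PySem.List.pyGetD ls i 0) y) acc
            (PySem.List.mem_pyRange_one.mp hi).1
    _ = loopA ls m := hdrop ls m

lemma portA_eq (raw_labels : List (List Int)) (dim : Int) :
    count_Co_Occurence raw_labels dim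
      = raw_labels.foldl (fun M ls => loopA ls M)
          (List.replicate dim.toNat (List.replicate dim.toNat (0 : Int))) := by
  unfold count_Co_Occurence
  apply PySem.List.foldl_congr_mem
  intro acc ls _
  exact portA_inner_eq ls acc

-- ---- B side: structural loop, shape and entries ----

lemma loopBq_char {dim : Int} (qs : List (Int × Int)) (p : Int × Int) :
    ∀ m : List (List Int), Shape m dim.toNat → InR dim p.1 → (∀ q ∈ qs, InR dim q.1) →
    ∀ i j : Nat,
    Shape (qs.foldl (fun M q => if p.1 ≠ q.1 then madd M p.1 q.1 (p.2 * q.2) else M) m) dim.toNat ∧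
    ent (qs.foldl (fun M q => if p.1 ≠ q.1 then madd M p.1 q.1 (p.2 * q.2) else M) m) i j
      = ent m i j + isum qs (fun q => if p.1 = q.1 then 0 else
          chi dim p.1 i * chi dim q.1 j * (p.2 * q.2)) := by
  induction qs with
  | nil => intro m hm _ _ i j; exact ⟨hm, by simp [isum]⟩
  | cons q t ih =>
    intro m hm hp hqs i j
    have hq : InR dim q.1 := hqs q (by simp)
    have hstep : Shape (if p.1 ≠ q.1 then madd m p.1 q.1 (p.2 * q.2) else m) dim.toNat ∧
        ent (if p.1 ≠ q.1 then madd m p.1 q.1 (p.2 * q.2) else m) i j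
          = ent m i j + (if p.1 = q.1 then 0 else chi dim p.1 i * chi dim q.1 j * (p.2 * q.2)) := by
      by_cases hpq : p.1 = q.1
      · rw [if_neg (fun hc => hc hpq), if_pos hpq]
        exact ⟨hm, by ring⟩
      · rw [if_pos hpq, if_neg hpq]
        exact ⟨shape_madd hm _ _ _, by rw [ent_madd hm hp hq _ i j]⟩
    have hrec := ih _ hstep.1 hp (fun z hz => hqs z (by simp [hz]))
    refine ⟨(hrec i j).1, ?_⟩
    rw [List.foldl_cons, (hrec i j).2, hstep.2]
    simp [isum]
    ring

lemma loopBp_char {dim : Int} (items ps : List (Int × Int)) :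
    ∀ m : List (List Int), Shape m dim.toNat → (∀ p ∈ ps, InR dim p.1) →
    (∀ q ∈ items, InR dim q.1) →
    ∀ i j : Nat,
    Shape (ps.foldl (fun M p =>
        items.foldl (fun M q => if p.1 ≠ q.1 then madd M p.1 q.1 (p.2 * q.2) else M)
          (madd M p.1 p.1 (PySem.Int.floordiv (p.2 * (p.2 + 1)) 2))) m) dim.toNat ∧
    ent (ps.foldl (fun M p =>
        items.foldl (fun M q => if p.1 ≠ q.1 then madd M p.1 q.1 (p.2 * q.2) else M)
          (madd M p.1 p.1 (PySem.Int.floordiv (p.2 * (p.2 + 1)) 2))) m) i j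
      = ent m i j + isum ps (fun p =>
          chi dim p.1 i * chi dim p.1 j * PySem.Int.floordiv (p.2 * (p.2 + 1)) 2 +
          isum items (fun q => if p.1 = q.1 then 0 else
            chi dim p.1 i * chi dim q.1 j * (p.2 * q.2))) := by
  induction ps with
  | nil => intro m hm _ _ i j; exact ⟨hm, by simp [isum]⟩
  | cons p t ih =>
    intro m hm hps hitems i j
    have hp : InR dim p.1 := hps p (by simp)
    have hdiag : Shape (madd m p.1 p.1 (PySem.Int.floordiv (p.2 * (p.2 + 1)) 2)) dim.toNat :=
      shape_madd hm _ _ _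
    have hinner := loopBq_char (dim := dim) items p _ hdiag hp hitems
    have hrec := ih _ (hinner 0 0).1 (fun z hz => hps z (by simp [hz])) hitems
    refine ⟨(hrec i j).1, ?_⟩
    rw [List.foldl_cons, (hrec i j).2, (hinner i j).2,
      ent_madd hm hp hp _ i j]
    simp [isum]
    ring

lemma loopB_char {dim : Int} (ls : List Int) (m : List (List Int))
    (hm : Shape m dim.toNat) (hls : ∀ x ∈ ls, InR dim x) (i j : Nat) :
    Shape (loopB ls m) dim.toNat ∧
    ent (loopB ls m) i j = ent m i j + sb (chi dim · i) (chi dim · j) ls := by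
  have hkeys : ∀ q ∈ itemsOf ls, InR dim q.1 := by
    intro q hq
    obtain ⟨k, hk, rfl⟩ := List.mem_map.mp hq
    exact hls k ((PySem.Set.mem_ofList ls k).mp hk)
  exact loopBp_char (dim := dim) (itemsOf ls) (itemsOf ls) m hm hkeys hkeys i j

lemma portB_eq (raw_labels : List (List Int)) (dim : Int) :
    count_Co_Occurence_alt raw_labels dim
      = raw_labels.foldl (fun M ls => loopB ls M)
          (List.replicate dim.toNat (List.replicate dim.toNat (0 : Int))) := by
  unfold count_Co_Occurence_alt
  apply PySem.List.foldl_congr_mem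
  intro acc ls _
  show ((ls.foldl (fun d l => d.insert l (d.getD l 0 + 1)) PySem.Dict.empty).items).foldl
      (fun M p => ((ls.foldl (fun d l => d.insert l (d.getD l 0 + 1)) PySem.Dict.empty).items).foldl
        (fun M q => if p.1 ≠ q.1 then madd M p.1 q.1 (p.2 * q.2) else M)
        (madd M p.1 p.1 (PySem.Int.floordiv (p.2 * (p.2 + 1)) 2))) acc = loopB ls acc
  rw [PySem.Dict.foldl_insert_getD_add_one_eq_counter, PySem.Dict.items_counter]
  rfl

-- ---- the combinatorial identity: pair enumeration = count-then-combine ----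

lemma isum_congr {α : Type} {l : List α} {F G : α → Int} (h : ∀ y ∈ l, F y = G y) :
    isum l F = isum l G := by
  unfold isum
  exact congrArg List.sum (List.map_congr_left h)

lemma isum_sub {α : Type} (l : List α) (A B : α → Int) :
    isum l (fun y => A y - B y) = isum l A - isum l B := by
  unfold isum
  have h1 : ∀ y ∈ l, A y - B y = A y + (-1) * B y := by intro y _; ring
  rw [show (fun y => A y - B y) = fun y => A y - B y from rfl]
  calc (l.map (fun y => A y - B y)).sum
      = (l.map (fun y => A y + (-1) * B y)).sum := congrArg List.sum (List.map_congr_left h1)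
    _ = (l.map A).sum + (l.map (fun y => (-1) * B y)).sum := PySem.List.sum_map_add_int l A _
    _ = (l.map A).sum + (-1) * (l.map B).sum := by rw [List.sum_map_mul_left]
    _ = (l.map A).sum - (l.map B).sum := by ring

lemma isum_ite_count (t : List Int) (x : Int) (h : Int → Int) :
    isum t (fun y => if x = y then h y else 0) = (t.count x : Int) * h x := by
  induction t with
  | nil => simp [isum]
  | cons y t ih =>
    have hcons : isum (y :: t) (fun y2 => if x = y2 then h y2 else 0)
        = (if x = y then h y else 0) + isum t (fun y2 => if x = y2 then h y2 else 0) := by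
      simp [isum]
    rw [hcons, ih, List.count_cons]
    by_cases hxy : x = y
    · subst hxy
      simp only [BEq.rfl, if_true]
      push_cast
      ring
    · have hne : (y == x) = false := by simp [Ne.symm hxy]
      rw [if_neg hxy, hne]
      push_cast
      ring

lemma pw_closed (f g : Int → Int) (ls : List Int) :
    pw f g ls = isum ls f * isum ls g - corr f g ls := by
  induction ls with
  | nil => simp [pw, isum, corr]
  | cons x t ih =>
    have hsplit : isum (x :: t) (wgt f g x) = wgt f g x x + isum t (wgt f g x) := by
      simp [isum]
    have hxx : wgt f g x x = f x * g x := by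
      unfold wgt; rw [if_pos rfl]; ring
    have hw : isum t (wgt f g x)
        = f x * isum t g + (isum t f * g x - (t.count x : Int) * (f x * g x)) := by
      have h0 : isum t (wgt f g x)
          = isum t (fun y => f x * g y) + isum t (fun y => if x = y then 0 else f y * g x) := by
        unfold wgt
        exact PySem.List.sum_map_add_int t _ _
      have h2 : isum t (fun y => if x = y then 0 else f y * g x)
          = isum t (fun y => f y * g x) - isum t (fun y => if x = y then f y * g x else 0) := by
        rw [← isum_sub]
        apply isum_congr
        intro y _
        by_cases hxy : x = y <;> simp [hxy]
      have h3 : isum t (fun y => f y * g x) = isum t f * g x := by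
        unfold isum; exact List.sum_map_mul_right t f (g x)
      have h4 : isum t (fun y => f x * g y) = f x * isum t g := by
        unfold isum; exact List.sum_map_mul_left t g (f x)
      rw [h0, h2, h3, h4, isum_ite_count]
    have hf : isum (x :: t) f = f x + isum t f := by simp [isum]
    have hg : isum (x :: t) g = g x + isum t g := by simp [isum]
    rw [pw, hsplit, hxx, hw, ih, hf, hg, corr]
    ring

lemma corr_toFinset (f g : Int → Int) (ls : List Int) :
    corr f g ls = ∑ a ∈ ls.toFinset, f a * g a * tl ((ls.count a : Int)) := by
  induction ls with
  | nil => simp [corr]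
  | cons x t ih =>
    have hpt : ∀ a ∈ t.toFinset, f a * g a * tl (((x :: t).count a : Int))
        = f a * g a * tl ((t.count a : Int)) + (if a = x then f a * g a * (t.count x : Int) else 0) := by
      intro a _
      by_cases hax : a = x
      · subst hax
        rw [if_pos rfl, List.count_cons]
        simp only [BEq.rfl, if_true]
        push_cast
        rw [tl_succ]
        ring
      · have hne : (x == a) = false := by simp [Ne.symm hax]
        rw [if_neg hax, List.count_cons, hne]
        simp
    rw [corr, ih, List.toFinset_cons]
    by_cases hx : x ∈ t
    · rw [Finset.insert_eq_self.mpr (List.mem_toFinset.mpr hx),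
        Finset.sum_congr rfl hpt, Finset.sum_add_distrib,
        Finset.sum_ite_eq' t.toFinset x _, if_pos (List.mem_toFinset.mpr hx)]
      ring
    · rw [Finset.sum_insert (fun hc => hx (List.mem_toFinset.mp hc)),
        Finset.sum_congr rfl hpt, Finset.sum_add_distrib,
        Finset.sum_ite_eq' t.toFinset x _, if_neg (fun hc => hx (List.mem_toFinset.mp hc))]
      have hcx : (x :: t).count x = t.count x + 1 := by rw [List.count_cons]; simp
      have hc0 : t.count x = 0 := List.count_eq_zero.mpr hx
      rw [hcx, hc0]
      have htl1 : tl ((0 + 1 : Nat) : Int) = 0 := by decide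
      rw [htl1]
      push_cast
      ring

lemma sb_closed (f g : Int → Int) (ls : List Int) :
    sb f g ls = isum ls f * isum ls g - ∑ a ∈ ls.toFinset, f a * g a * tl ((ls.count a : Int)) := by
  have hsum : ∀ F : Int → Int, isum (PySem.Set.ofList ls) F = ∑ a ∈ ls.toFinset, F a := by
    intro F
    have hset : (PySem.Set.ofList ls).toFinset = ls.toFinset := by
      ext a
      simp [List.mem_toFinset, PySem.Set.mem_ofList]
    have := List.sum_toFinset F (PySem.Set.nodup_ofList (α := Int) ls)
    rw [hset] at this
    exact this.symm
  have hkey : ∀ F : Int → Int, ∑ a ∈ ls.toFinset, (ls.count a : Int) * F a = isum ls F := by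
    intro F
    unfold isum
    rw [Finset.sum_list_map_count]
    exact (Finset.sum_congr rfl (fun a _ => (nsmul_eq_mul _ _))).symm
  have hmap : ∀ F : Int × Int → Int, isum (itemsOf ls) F
      = isum (PySem.Set.ofList ls) (fun k => F (k, (ls.count k : Int))) := by
    intro F
    unfold isum itemsOf
    rw [List.map_map]
    rfl
  unfold sb
  rw [hmap, hsum]
  have hinner : ∀ a ∈ ls.toFinset,
      (f a * g a * PySem.Int.floordiv ((ls.count a : Int) * ((ls.count a : Int) + 1)) 2 +
        isum (itemsOf ls) (fun q => if a = q.1 then 0 else f a * g q.1 * ((ls.count a : Int) * q.2)))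
      = (ls.count a : Int) * (f a * isum ls g) - f a * g a * tl ((ls.count a : Int)) := by
    intro a ha
    rw [hmap, hsum]
    have hsplit : ∀ b ∈ ls.toFinset,
        (if a = b then 0 else f a * g b * ((ls.count a : Int) * (ls.count b : Int)))
        = (ls.count b : Int) * ((f a * (ls.count a : Int)) * g b)
          - (if a = b then (ls.count b : Int) * ((f a * (ls.count a : Int)) * g b) else 0) := by
      intro b _
      by_cases hab : a = b
      · simp [hab]
      · simp [hab]; ring
    rw [Finset.sum_congr rfl hsplit, Finset.sum_sub_distrib,
      Finset.sum_ite_eq ls.toFinset a _, if_pos ha]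
    have hmul : ∑ b ∈ ls.toFinset, (ls.count b : Int) * ((f a * (ls.count a : Int)) * g b)
        = (f a * (ls.count a : Int)) * isum ls g := by
      rw [hkey (fun b => (f a * (ls.count a : Int)) * g b)]
      unfold isum
      exact List.sum_map_mul_left ls g _
    rw [hmul]
    have ht : PySem.Int.floordiv ((ls.count a : Int) * ((ls.count a : Int) + 1)) 2
        = (ls.count a : Int) * (ls.count a : Int) - tl ((ls.count a : Int)) := by
      have := t2_sub_sq ((ls.count a : Int))
      linarith
    rw [ht]
    ring
  rw [Finset.sum_congr rfl hinner, Finset.sum_sub_distrib,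
    hkey (fun a => f a * isum ls g)]
  have : isum ls (fun a => f a * isum ls g) = isum ls f * isum ls g := by
    unfold isum
    exact List.sum_map_mul_right ls f _
  rw [this]

lemma pw_eq_sb (f g : Int → Int) (ls : List Int) : pw f g ls = sb f g ls := by
  rw [pw_closed, sb_closed, corr_toFinset]

-- ---- assembling the two ports ----

lemma shape_mat0 (d : Nat) : Shape (List.replicate d (List.replicate d (0 : Int))) d := by
  constructor
  · simp
  · intro r hr
    simp_all [List.eq_of_mem_replicate hr]

lemma foldA_char {dim : Int} (raw : List (List Int)) :
    ∀ m : List (List Int), Shape m dim.toNat → (∀ ls ∈ raw, ∀ x ∈ ls, InR dim x) →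
    ∀ i j : Nat,
    Shape (raw.foldl (fun M ls => loopA ls M) m) dim.toNat ∧
    ent (raw.foldl (fun M ls => loopA ls M) m) i j
      = ent m i j + isum raw (fun ls => pw (chi dim · i) (chi dim · j) ls) := by
  induction raw with
  | nil => intro m hm _ i j; exact ⟨hm, by simp [isum]⟩
  | cons ls t ih =>
    intro m hm hraw i j
    have hls : ∀ x ∈ ls, InR dim x := hraw ls (by simp)
    have hone := loopA_char (dim := dim) ls m hm hls
    have hrec := ih _ (hone 0 0).1 (fun z hz => hraw z (by simp [hz]))
    refine ⟨(hrec i j).1, ?_⟩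
    rw [List.foldl_cons, (hrec i j).2, (hone i j).2]
    simp [isum]
    ring

lemma foldB_char {dim : Int} (raw : List (List Int)) :
    ∀ m : List (List Int), Shape m dim.toNat → (∀ ls ∈ raw, ∀ x ∈ ls, InR dim x) →
    ∀ i j : Nat,
    Shape (raw.foldl (fun M ls => loopB ls M) m) dim.toNat ∧
    ent (raw.foldl (fun M ls => loopB ls M) m) i j
      = ent m i j + isum raw (fun ls => sb (chi dim · i) (chi dim · j) ls) := by
  induction raw with
  | nil => intro m hm _ i j; exact ⟨hm, by simp [isum]⟩
  | cons ls t ih =>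
    intro m hm hraw i j
    have hls : ∀ x ∈ ls, InR dim x := hraw ls (by simp)
    have hone := fun i j => loopB_char (dim := dim) ls m hm hls i j
    have hrec := ih _ (hone 0 0).1 (fun z hz => hraw z (by simp [hz]))
    refine ⟨(hrec i j).1, ?_⟩
    rw [List.foldl_cons, (hrec i j).2, (hone i j).2]
    simp [isum]
    ring

-- ===== VERDICT (by name: the statement is the Claim_ definition above) =====
theorem count_Co_Occurence_spec : Claim_equal_count_Co_Occurence := by
  intro raw dim _dom pre
  unfold Spec_count_Co_Occurence
  rw [portA_eq, portB_eq]
  have hpre : ∀ ls ∈ raw, ∀ x ∈ ls, InR dim x := pre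
  have h0 := shape_mat0 dim.toNat
  have hA := foldA_char raw _ h0 hpre
  have hB := foldB_char raw _ h0 hpre
  exact mat_eq_of_ent (hA 0 0).1 (hB 0 0).1 (fun i j => by
    rw [(hA i j).2, (hB i j).2]
    congr 1
    unfold isum
    exact congrArg List.sum (List.map_congr_left (fun ls _ => pw_eq_sb _ _ ls)))
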